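-- pv_equiv track=rewrite | github.com/tsangwpx/leetcode | src/p2xxx/p2558.py | pickGifts
-- ===== SOURCE A (Python) =====
-- from typing import List
--
-- def pickGifts(gifts: List[int], k: int) -> int:
--     from math import isqrt
--     from heapq import heapify, heappop, heappush
--
--     # convert to negative number in min-heap
--     pq = [-s for s in gifts]
--     heapify(pq)
--
--     for _ in range(k):
--         if not pq:
--             break
--
--         count = -heappop(pq)
--         left = isqrt(count)
--         if left:
--             heappush(pq, -left)
--
--     return -sum(pq)
-- ===== SOURCE B (Python) =====
-- from typing import List
--
-- def pickGifts(gifts: List[int], k: int) -> int: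
--     from math import isqrt
--
--     gifts = list(gifts)  # work on a copy; the argument is never mutated
--     for _ in range(k):
--         if not gifts:
--             break
--         m = max(gifts)
--         i = gifts.index(m)
--         gifts[i] = isqrt(m)
--     return sum(gifts)
-- ===== Notes on version B (the rewrite author's own statement) =====
-- stated objective: simpler
-- what changed: Replaced the negated min-heap (heapify/heappop/heappush) with a plain copied list updated in place: each round finds the maximum by a linear scan and overwrites it with its isqrt, returning the final sum.
import Mathlib
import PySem

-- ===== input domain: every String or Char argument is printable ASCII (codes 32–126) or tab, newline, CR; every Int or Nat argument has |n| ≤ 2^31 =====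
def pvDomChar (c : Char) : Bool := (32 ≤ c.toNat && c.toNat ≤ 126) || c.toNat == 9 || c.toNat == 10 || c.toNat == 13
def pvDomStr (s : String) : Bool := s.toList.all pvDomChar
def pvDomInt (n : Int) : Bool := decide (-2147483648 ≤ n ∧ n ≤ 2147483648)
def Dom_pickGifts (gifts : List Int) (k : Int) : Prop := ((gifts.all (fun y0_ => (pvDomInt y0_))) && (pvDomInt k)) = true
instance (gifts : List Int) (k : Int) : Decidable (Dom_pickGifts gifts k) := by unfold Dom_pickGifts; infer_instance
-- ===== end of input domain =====

-- B replaces A's negated min-heap with a plain copied list updated in place by linear max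
-- scans (simpler, not faster); A never mutates its argument and neither does B.


-- ===== PORT A =====
-- math.isqrt; exact for 0 ≤ n (Python raises ValueError for n < 0: those runs are excluded by Pre_)
def isqrtP (n : Int) : Int := Int.sqrt n

-- A's heap carries the negated gifts; heapify/heappop/heappush are ported contract-level on the
-- heap's contents: heappop yields the minimum element (PySem.List.min?) and removes one copy of it
-- (PySem.List.remove?), heappush adds the element; the popped VALUE and the multiset of contents —
-- all A's result depends on — are exactly Python's.
def pickGiftsLoopA : Nat → List Int → List Int
  | 0, pq => pq
  | n + 1, pq =>
    if pq.isEmpty then pq                -- "if not pq: break"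
    else
      match PySem.List.min? pq (fun x => x) with
      | none => pq
      | some m =>
        let rest := (PySem.List.remove? pq m).getD pq
        let count := -m
        let left := isqrtP count
        pickGiftsLoopA n (if left ≠ 0 then (-left) :: rest else rest)

def pickGifts (gifts : List Int) (k : Int) : Int :=
  let pq := gifts.map (fun s => -s);
  -(pickGiftsLoopA k.toNat pq).sum

-- ===== PORT B =====
def pickGiftsLoopB : Nat → List Int → List Int
  | 0, gs => gs
  | n + 1, gs =>
    if gs.isEmpty then gs                -- "if not gifts: break"
    else
      match PySem.List.max? gs (fun x => x) with
      | none => gs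
      | some m =>
        match PySem.List.index? gs m with
        | none => gs
        | some i => pickGiftsLoopB n (gs.set i (isqrtP m))

def pickGifts_alt (gifts : List Int) (k : Int) : Int :=
  (pickGiftsLoopB k.toNat gifts).sum

-- ===== PRECONDITION & SPEC =====
-- Pre_ is exactly the set of inputs on which A returns: A raises ValueError (isqrt of a negative)
-- precisely when k ≥ 1, every gift is ≤ 0, some gift is negative, and fewer than k zeros are present.
def Pre_pickGifts (gifts : List Int) (k : Int) : Prop :=
  k ≤ 0 ∨ (∃ g ∈ gifts, 1 ≤ g) ∨ (∀ g ∈ gifts, 0 ≤ g) ∨ k ≤ (gifts.count 0 : Int)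
instance (gifts : List Int) (k : Int) : Decidable (Pre_pickGifts gifts k) := by
  unfold Pre_pickGifts; infer_instance

def pvWitness_pickGifts : List Int × Int := ([9, 4, -3], 2)

def Spec_pickGifts (gifts : List Int) (k : Int) (out : Int) : Prop := out = pickGifts_alt gifts k
instance (gifts : List Int) (k : Int) (out : Int) : Decidable (Spec_pickGifts gifts k out) := by
  unfold Spec_pickGifts; infer_instance

-- ===== CLAIM (what is proved, stated in full; the proofs are below) =====
def Claim_equal_pickGifts : Prop := ∀ (gifts : List Int) (k : Int), Dom_pickGifts gifts k → Pre_pickGifts gifts k → Spec_pickGifts gifts k (pickGifts gifts k)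

-- ===== LEMMAS AND PROOFS =====

-- math.isqrt is ≥ 1 on arguments ≥ 1, and 0 at 0
theorem isqrtP_one_le {n : Int} (h : 1 ≤ n) : 1 ≤ isqrtP n := by
  unfold isqrtP Int.sqrt
  have h1 : 0 < n.toNat := by omega
  have h2 : 0 < Nat.sqrt n.toNat := Nat.sqrt_pos.mpr h1
  omega

theorem isqrtP_zero : isqrtP 0 = 0 := by decide

-- main case: while some gift is ≥ 1, A's heap contents stay a permutation of the negations of
-- B's list: both replace the (unique-valued) maximum by its integer square root each round
theorem loopAB_perm (n : Nat) : ∀ (pq gs : List Int),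
    pq.Perm (gs.map (fun x => -x)) → (∃ g ∈ gs, 1 ≤ g) →
    (pickGiftsLoopA n pq).Perm ((pickGiftsLoopB n gs).map (fun x => -x)) := by
  induction n with
  | zero => intro pq gs hperm _; simpa [pickGiftsLoopA, pickGiftsLoopB] using hperm
  | succ n ih =>
    intro pq gs hperm hex
    obtain ⟨g, hg, hg1⟩ := hex
    have hgs : gs ≠ [] := by rintro rfl; simp at hg
    have hpq : pq ≠ [] := by
      rintro rfl
      have hlen := hperm.length_eq
      simp at hlen
      exact hgs (List.eq_nil_of_length_eq_zero hlen.symm)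
    obtain ⟨M, hM⟩ : ∃ M, PySem.List.max? gs (fun x => x) = some M := by
      cases hc : PySem.List.max? gs (fun x => x) with
      | none => exact absurd ((PySem.List.max?_eq_none_iff _ _).mp hc) hgs
      | some M => exact ⟨M, rfl⟩
    obtain ⟨m, hm⟩ : ∃ m, PySem.List.min? pq (fun x => x) = some m := by
      cases hc : PySem.List.min? pq (fun x => x) with
      | none => exact absurd ((PySem.List.min?_eq_none_iff _ _).mp hc) hpq
      | some m => exact ⟨m, rfl⟩
    have hMmem : M ∈ gs := PySem.List.max?_mem hM
    have hMmax := PySem.List.max?_isMax hM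
    have hmmem : m ∈ pq := PySem.List.min?_mem hm
    have hmmin := PySem.List.min?_isMin hm
    have hM1 : 1 ≤ M := le_trans hg1 (hMmax g hg)
    have hmM : m = -M := by
      have h1 : m ≤ -M := hmmin _ (hperm.mem_iff.mpr (List.mem_map_of_mem hMmem))
      obtain ⟨g', hg', hgm⟩ := List.mem_map.mp (hperm.mem_iff.mp hmmem)
      have h2 := hMmax g' hg'
      simp only at h1 h2 ⊢
      omega
    subst hmM
    have hv1 : 1 ≤ isqrtP M := isqrtP_one_le hM1
    obtain ⟨i, hi⟩ : ∃ i, PySem.List.index? gs M = some i := by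
      cases hc : PySem.List.index? gs M with
      | none => exact absurd ((PySem.List.index?_eq_none_iff _ _).mp hc) (by simp [hMmem])
      | some i => exact ⟨i, rfl⟩
    obtain ⟨pre, suf, hgseq, hleni, hMpre⟩ := (PySem.List.index?_eq_some_iff _ _ _).mp hi
    have hset : gs.set i (isqrtP M) = pre ++ isqrtP M :: suf := by
      subst hgseq; rw [← hleni]; simp
    have hnMpre : (-M) ∉ pre.map (fun x => -x) := by
      intro hc
      obtain ⟨p, hp, hpe⟩ := List.mem_map.mp hc
      have : p = M := by omega
      exact hMpre (this ▸ hp)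
    have herase : (pq.erase (-M)).Perm (pre.map (fun x => -x) ++ suf.map (fun x => -x)) := by
      have h1 : (pq.erase (-M)).Perm ((gs.map (fun x => -x)).erase (-M)) := hperm.erase (-M)
      have h2 : (gs.map (fun x => -x)).erase (-M)
          = pre.map (fun x => -x) ++ suf.map (fun x => -x) := by
        subst hgseq
        rw [List.map_append, List.map_cons, List.erase_append_right _ hnMpre,
          List.erase_cons_head]
      rw [h2] at h1; exact h1
    have hperm' : ((-(isqrtP M)) :: pq.erase (-M)).Perm
        ((gs.set i (isqrtP M)).map (fun x => -x)) := by
      rw [hset, List.map_append, List.map_cons]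
      exact (herase.cons _).trans List.perm_middle.symm
    have hex' : ∃ g ∈ gs.set i (isqrtP M), 1 ≤ g := by
      refine ⟨isqrtP M, ?_, hv1⟩
      rw [hset]; simp
    have hrem : PySem.List.remove? pq (-M) = some (pq.erase (-M)) :=
      PySem.List.remove?_eq_some_erase pq (-M) hmmem
    have hA1 : pickGiftsLoopA (n + 1) pq
        = pickGiftsLoopA n ((-(isqrtP M)) :: pq.erase (-M)) := by
      simp only [pickGiftsLoopA, hm, hrem, Option.getD_some, neg_neg]
      rw [if_neg (by simp [hpq]), if_pos (by omega)]
    have hB1 : pickGiftsLoopB (n + 1) gs = pickGiftsLoopB n (gs.set i (isqrtP M)) := by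
      simp only [pickGiftsLoopB, hM, hi]
      rw [if_neg (by simp [hgs])]
    rw [hA1, hB1]
    exact ih _ _ hperm' hex'

-- degenerate case: every element 0 keeps both loops' sums at 0
theorem loopA_allzero (n : Nat) : ∀ pq : List Int,
    (∀ x ∈ pq, x = 0) → (pickGiftsLoopA n pq).sum = 0 := by
  induction n with
  | zero => intro pq h0; exact List.sum_eq_zero h0
  | succ n ih =>
    intro pq h0
    by_cases hpq : pq = []
    · subst hpq; simp [pickGiftsLoopA]
    · obtain ⟨m, hm⟩ : ∃ m, PySem.List.min? pq (fun x => x) = some m := by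
        cases hc : PySem.List.min? pq (fun x => x) with
        | none => exact absurd ((PySem.List.min?_eq_none_iff _ _).mp hc) hpq
        | some m => exact ⟨m, rfl⟩
      have hmmem : m ∈ pq := PySem.List.min?_mem hm
      have hm0 : m = 0 := h0 m hmmem
      subst hm0
      have hrem : PySem.List.remove? pq 0 = some (pq.erase 0) :=
        PySem.List.remove?_eq_some_erase pq 0 hmmem
      have hA1 : pickGiftsLoopA (n + 1) pq = pickGiftsLoopA n (pq.erase 0) := by
        simp only [pickGiftsLoopA, hm, hrem, Option.getD_some, neg_zero, isqrtP_zero]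
        rw [if_neg (by simp [hpq]), if_neg (by simp)]
      rw [hA1]
      exact ih _ (fun x hx => h0 x (List.mem_of_mem_erase hx))

theorem loopB_allzero (n : Nat) : ∀ gs : List Int,
    (∀ x ∈ gs, x = 0) → (pickGiftsLoopB n gs).sum = 0 := by
  induction n with
  | zero => intro gs h0; exact List.sum_eq_zero h0
  | succ n ih =>
    intro gs h0
    by_cases hgs : gs = []
    · subst hgs; simp [pickGiftsLoopB]
    · obtain ⟨M, hM⟩ : ∃ M, PySem.List.max? gs (fun x => x) = some M := by
        cases hc : PySem.List.max? gs (fun x => x) with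
        | none => exact absurd ((PySem.List.max?_eq_none_iff _ _).mp hc) hgs
        | some M => exact ⟨M, rfl⟩
      have hMmem : M ∈ gs := PySem.List.max?_mem hM
      obtain ⟨i, hi⟩ : ∃ i, PySem.List.index? gs M = some i := by
        cases hc : PySem.List.index? gs M with
        | none => exact absurd ((PySem.List.index?_eq_none_iff _ _).mp hc) (by simp [hMmem])
        | some i => exact ⟨i, rfl⟩
      have hB1 : pickGiftsLoopB (n + 1) gs = pickGiftsLoopB n (gs.set i (isqrtP M)) := by
        simp only [pickGiftsLoopB, hM, hi]
        rw [if_neg (by simp [hgs])]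
      rw [hB1]
      refine ih _ (fun x hx => ?_)
      rcases List.mem_or_eq_of_mem_set hx with h | h
      · exact h0 x h
      · rw [h, h0 M hMmem, isqrtP_zero]

-- zero-rich case: with all elements ≥ 0 and at least n zeros, A pops a zero each round
theorem loopA_zeros (n : Nat) : ∀ pq : List Int,
    (∀ x ∈ pq, 0 ≤ x) → n ≤ pq.count 0 → (pickGiftsLoopA n pq).sum = pq.sum := by
  induction n with
  | zero => intro pq _ _; rfl
  | succ n ih =>
    intro pq hnn hcnt
    have h0mem : (0 : Int) ∈ pq := List.count_pos_iff.mp (by omega)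
    have hpq : pq ≠ [] := by rintro rfl; simp at h0mem
    obtain ⟨m, hm⟩ : ∃ m, PySem.List.min? pq (fun x => x) = some m := by
      cases hc : PySem.List.min? pq (fun x => x) with
      | none => exact absurd ((PySem.List.min?_eq_none_iff _ _).mp hc) hpq
      | some m => exact ⟨m, rfl⟩
    have hmmem : m ∈ pq := PySem.List.min?_mem hm
    have hm0 : m = 0 := le_antisymm (PySem.List.min?_isMin hm 0 h0mem) (hnn m hmmem)
    subst hm0
    have hrem : PySem.List.remove? pq 0 = some (pq.erase 0) :=
      PySem.List.remove?_eq_some_erase pq 0 hmmem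
    have hA1 : pickGiftsLoopA (n + 1) pq = pickGiftsLoopA n (pq.erase 0) := by
      simp only [pickGiftsLoopA, hm, hrem, Option.getD_some, neg_zero, isqrtP_zero]
      rw [if_neg (by simp [hpq]), if_neg (by simp)]
    have hsum : (pq.erase 0).sum = pq.sum := by
      have h := (List.perm_cons_erase h0mem).sum_eq
      simpa using h.symm
    have hce : (pq.erase 0).count 0 = pq.count 0 - 1 := List.count_erase_self
    rw [hA1, ih _ (fun x hx => hnn x (List.mem_of_mem_erase hx)) (by omega), hsum]

-- zero-rich case: with all elements ≤ 0 and a zero present, B rewrites a zero to 0 each round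
theorem loopB_zeromax (n : Nat) : ∀ gs : List Int,
    (∀ x ∈ gs, x ≤ 0) → (0 : Int) ∈ gs → pickGiftsLoopB n gs = gs := by
  induction n with
  | zero => intro gs _ _; rfl
  | succ n ih =>
    intro gs hnp h0mem
    have hgs : gs ≠ [] := by rintro rfl; simp at h0mem
    obtain ⟨M, hM⟩ : ∃ M, PySem.List.max? gs (fun x => x) = some M := by
      cases hc : PySem.List.max? gs (fun x => x) with
      | none => exact absurd ((PySem.List.max?_eq_none_iff _ _).mp hc) hgs
      | some M => exact ⟨M, rfl⟩
    have hMmem : M ∈ gs := PySem.List.max?_mem hM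
    have hM0 : M = 0 := le_antisymm (hnp M hMmem) (PySem.List.max?_isMax hM 0 h0mem)
    obtain ⟨i, hi⟩ : ∃ i, PySem.List.index? gs M = some i := by
      cases hc : PySem.List.index? gs M with
      | none => exact absurd ((PySem.List.index?_eq_none_iff _ _).mp hc) (by simp [hMmem])
      | some i => exact ⟨i, rfl⟩
    obtain ⟨hilt, hgi, -⟩ := PySem.List.getElem_of_index?_eq_some hi
    have hsetid : gs.set i (isqrtP M) = gs := by
      have hv : isqrtP M = gs[i] := by rw [hgi, hM0, isqrtP_zero]
      rw [hv]
      exact List.set_getElem_self hilt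
    have hB1 : pickGiftsLoopB (n + 1) gs = pickGiftsLoopB n gs := by
      simp only [pickGiftsLoopB, hM, hi, hsetid]
      rw [if_neg (by simp [hgs])]
    rw [hB1]
    exact ih gs hnp h0mem

theorem sum_map_neg_int (l : List Int) : (l.map (fun x : Int => -x)).sum = -l.sum := by
  induction l with
  | nil => simp
  | cons a t ih => simp [ih]; ring

-- ===== VERDICT (by name: the statement is the Claim_ definition above) =====
theorem pickGifts_spec : Claim_equal_pickGifts := by
  intro gifts k _hdom hpre
  unfold Spec_pickGifts pickGifts pickGifts_alt
  show -(pickGiftsLoopA k.toNat (gifts.map (fun s => -s))).sum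
      = (pickGiftsLoopB k.toNat gifts).sum
  have hneg : (gifts.map (fun s : Int => -s)).sum = -gifts.sum := sum_map_neg_int gifts
  by_cases hk : k ≤ 0
  · have h0 : k.toNat = 0 := by omega
    rw [h0]
    show -(gifts.map (fun s : Int => -s)).sum = gifts.sum
    omega
  by_cases h1 : ∃ g ∈ gifts, 1 ≤ g
  · have hperm := loopAB_perm k.toNat (gifts.map (fun x => -x)) gifts (List.Perm.refl _) h1
    have hsum := hperm.sum_eq
    have hneg2 : ((pickGiftsLoopB k.toNat gifts).map (fun x : Int => -x)).sum
        = -(pickGiftsLoopB k.toNat gifts).sum := sum_map_neg_int _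
    omega
  · have hle : ∀ g ∈ gifts, g ≤ 0 := by
      intro g hg
      by_contra hc
      exact h1 ⟨g, hg, by omega⟩
    rcases hpre with hk' | h1' | hnn | hcnt
    · omega
    · exact absurd h1' h1
    · have h0 : ∀ x ∈ gifts, x = (0 : Int) := fun x hx =>
        le_antisymm (hle x hx) (hnn x hx)
      have hA := loopA_allzero k.toNat (gifts.map (fun x => -x))
        (by intro x hx; obtain ⟨g, hg, rfl⟩ := List.mem_map.mp hx; rw [h0 g hg]; rfl)
      have hB := loopB_allzero k.toNat gifts h0
      omega
    · have hkpos : 1 ≤ k := by omega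
      have hcnt' : k.toNat ≤ (gifts.map (fun x => -x)).count 0 := by
        have hinj : Function.Injective (fun x : Int => -x) := fun a b h => by
          simpa using h
        have hcm := List.count_map_of_injective gifts (fun x : Int => -x) hinj 0
        simp only [neg_zero] at hcm
        rw [hcm]
        omega
      have h0mem : (0 : Int) ∈ gifts := List.count_pos_iff.mp (by omega)
      have hA := loopA_zeros k.toNat (gifts.map (fun x => -x))
        (by intro x hx; obtain ⟨g, hg, rfl⟩ := List.mem_map.mp hx
            simpa using hle g hg) hcnt'
      rw [loopB_zeromax k.toNat gifts hle h0mem, hA]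
      omega
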